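-- pv_equiv track=rewrite | github.com/thdwlsgus0/algorithm_study | python/풍선터트리기.py | solution
-- ===== SOURCE A (Python) =====
-- def solution(a):
--     answer = 2 #어차피 양쪽은 가능
--     leftMin, rightMin = a[0], a[-1] #양쪽을 각각 최솟값으로 두고 탐색
--
--     for i in range(1, len(a) - 1):
--         if leftMin > a[i]:
--             answer += 1
--             leftMin = a[i]
--         if a[-1 - i] < rightMin:
--             answer += 1
--             rightMin = a[-1 - i]
--
--     return answer if leftMin != rightMin else answer - 1 #leftMin 과 rightMin이 중복되는 경우를 제외하고 반환
-- ===== SOURCE B (Python) =====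
-- def solution(a):
--     n = len(a)
--     if n == 1:
--         return 1
--     total = 2
--     for i in range(1, n - 1):
--         if a[i] < min(a[:i]):
--             total += 1
--         if a[i] < min(a[i+1:]):
--             total += 1
--     return total - 1 if min(a[:-1]) == min(a[1:]) else total
-- ===== Notes on version B (the rewrite author's own statement) =====
-- stated objective: simpler
-- what changed: A makes one pass carrying two running minima and a shared counter with negative-index reads a[-1-i]; B has no running state at all: for each interior index it directly tests a[i] against min() of the left slice and of the right slice, and reads the duplicate-minimum correction off min(a[:-1]) == min(a[1:]) - plainer to read at the cost of quadratic slice minima.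
import Mathlib
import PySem

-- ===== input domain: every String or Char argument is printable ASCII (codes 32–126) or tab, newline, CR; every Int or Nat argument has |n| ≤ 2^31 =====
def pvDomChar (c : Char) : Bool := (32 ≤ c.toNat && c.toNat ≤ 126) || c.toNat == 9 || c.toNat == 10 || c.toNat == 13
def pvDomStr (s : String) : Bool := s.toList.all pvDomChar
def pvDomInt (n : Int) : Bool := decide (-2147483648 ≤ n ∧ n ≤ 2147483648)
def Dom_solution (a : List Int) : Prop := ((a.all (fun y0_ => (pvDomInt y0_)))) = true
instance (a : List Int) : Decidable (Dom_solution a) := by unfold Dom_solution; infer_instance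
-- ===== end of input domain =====

-- B drops A's running-minima state entirely: it tests each interior element directly against
-- min() of its left slice and of its right slice (alternative stateless decomposition, quadratic).

-- ===== PORT A =====
-- the body of A's for-loop: update (answer, leftMin, rightMin) at index i
def solStep (a : List Int) (s : Int × Int × Int) (i : Int) : Int × Int × Int :=
  let s := if s.2.1 > PySem.List.pyGetD a i 0 then (s.1 + 1, PySem.List.pyGetD a i 0, s.2.2) else s
  if PySem.List.pyGetD a (-1 - i) 0 < s.2.2 then (s.1 + 1, s.2.1, PySem.List.pyGetD a (-1 - i) 0) else s

def solution (a : List Int) : Int :=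
  let leftMin := PySem.List.pyGetD a 0 0
  let rightMin := PySem.List.pyGetD a (-1) 0
  let s := (PySem.List.pyRange 1 ((a.length : Int) - 1) 1).foldl (solStep a)
    ((2 : Int), leftMin, rightMin)
  if s.2.1 ≠ s.2.2 then s.1 else s.1 - 1

-- ===== PORT B =====
-- the body of B's for-loop: two independent slice-minimum tests, no carried minima
def altStep (a : List Int) (total : Int) (i : Int) : Int :=
  let total := if PySem.List.pyGetD a i 0 <
      (PySem.List.min? (PySem.List.slice a none (some i)) (fun v => v)).getD 0 then total + 1 else total
  if PySem.List.pyGetD a i 0 <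
      (PySem.List.min? (PySem.List.slice a (some (i + 1)) none) (fun v => v)).getD 0 then total + 1 else total

def solution_alt (a : List Int) : Int :=
  let n : Int := a.length
  if n == 1 then 1
  else
    let total := (PySem.List.pyRange 1 (n - 1) 1).foldl (altStep a) (2 : Int)
    if (PySem.List.min? (PySem.List.slice a none (some (-1))) (fun v => v)).getD 0
        == (PySem.List.min? (PySem.List.slice a (some 1) none) (fun v => v)).getD 0
    then total - 1 else total

-- ===== PRECONDITION & SPEC =====
-- Pre_ excludes only the empty list, on which the Python A raises IndexError (a[0]).
def Pre_solution (a : List Int) : Prop := a ≠ []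
instance (a : List Int) : Decidable (Pre_solution a) := by unfold Pre_solution; infer_instance
def pvWitness_solution : List Int := [3, 1, 2]

def Spec_solution (a : List Int) (out : Int) : Prop := out = solution_alt a
instance (a : List Int) (out : Int) : Decidable (Spec_solution a out) := by unfold Spec_solution; infer_instance

-- ===== CLAIM (what is proved, stated in full; the proofs are below) =====
def Claim_equal_solution : Prop := ∀ (a : List Int), Dom_solution a → Pre_solution a → Spec_solution a (solution a)

-- ===== LEMMAS AND PROOFS =====

-- running minimum of m starting from c
def rmin : List Int → Int → Int
  | [], c => c
  | v :: t, c => rmin t (if v < c then v else c)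

-- number of strict decreases of the running minimum of m starting from c
def rcnt : List Int → Int → Nat
  | [], _ => 0
  | v :: t, c => (if v < c then 1 else 0) + rcnt t (if v < c then v else c)

-- number of indices k with m[k] < min of the suffix after k (seeded with y)
def scnt : List Int → Int → Nat
  | [], _ => 0
  | v :: t, y => (if v < rmin t y then 1 else 0) + scnt t y

-- per-index contributions of B's loop, precomputed as a list
def clist : List Int → Int → Int → List Int
  | [], _, _ => []
  | v :: t, c, y => ((if v < c then (1:Int) else 0) + (if v < rmin t y then (1:Int) else 0))
      :: clist t (if v < c then v else c) y

theorem ite_min (v c : Int) : (if v < c then v else c) = min v c := by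
  by_cases h : v < c
  · rw [if_pos h, min_eq_left h.le]
  · rw [if_neg h, min_eq_right (not_lt.mp h)]

theorem rmin_eq_foldl (m : List Int) : ∀ c : Int, rmin m c = m.foldl min c := by
  induction m with
  | nil => intro c; rfl
  | cons v t ih =>
    intro c
    simp only [rmin, List.foldl_cons, ite_min, min_comm v c]
    exact ih _

theorem foldl_min_out (t : List Int) : ∀ u y : Int, min (t.foldl min u) y = t.foldl min (min u y) := by
  induction t with
  | nil => intro u y; rfl
  | cons a t ih =>
    intro u y
    simp only [List.foldl_cons]
    rw [ih]
    congr 1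
    rw [min_right_comm]

theorem rmin_append (l : List Int) (v c : Int) : rmin (l ++ [v]) c = min (rmin l c) v := by
  simp [rmin_eq_foldl, List.foldl_append]

theorem rmin_reverse (m : List Int) : ∀ c : Int, rmin m.reverse c = rmin m c := by
  induction m with
  | nil => intro c; rfl
  | cons v t ih =>
    intro c
    rw [List.reverse_cons, rmin_append, ih]
    simp only [rmin, ite_min]
    rw [rmin_eq_foldl, rmin_eq_foldl, foldl_min_out, min_comm c v]

theorem rcnt_append (l : List Int) (v : Int) : ∀ c : Int,
    rcnt (l ++ [v]) c = rcnt l c + (if v < rmin l c then 1 else 0) := by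
  induction l with
  | nil => intro c; simp [rcnt, rmin]
  | cons u t ih =>
    intro c
    simp only [List.cons_append, rcnt, rmin, ih, Nat.add_assoc]
    rfl

theorem scnt_eq_rcnt_reverse (m : List Int) : ∀ y : Int, scnt m y = rcnt m.reverse y := by
  induction m with
  | nil => intro y; rfl
  | cons v t ih =>
    intro y
    rw [List.reverse_cons, rcnt_append, ← ih, rmin_reverse]
    simp only [scnt]
    exact Nat.add_comm _ _

theorem pymin_cons (x : Int) (t : List Int) :
    (PySem.List.min? (x :: t) (fun v => v)).getD 0 = rmin t x := by
  rw [PySem.List.min?_id_cons, Option.getD_some, rmin_eq_foldl]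

theorem pymin_append_y (l : List Int) (y : Int) :
    (PySem.List.min? (l ++ [y]) (fun v => v)).getD 0 = rmin l y := by
  cases l with
  | nil => simp [pymin_cons, rmin]
  | cons u t =>
    rw [List.cons_append, pymin_cons, rmin_append]
    simp only [rmin, ite_min]
    rw [rmin_eq_foldl, rmin_eq_foldl]
    exact foldl_min_out t u y

theorem clist_length (m : List Int) : ∀ c y : Int, (clist m c y).length = m.length := by
  induction m with
  | nil => intro c y; rfl
  | cons v t ih => intro c y; simp [clist, ih]

theorem clist_getD (m : List Int) : ∀ (k : Nat) (c y : Int), k < m.length →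
    (clist m c y).getD k 0 =
      (if m.getD k 0 < rmin (m.take k) c then (1:Int) else 0)
        + (if m.getD k 0 < rmin (m.drop (k+1)) y then (1:Int) else 0) := by
  induction m with
  | nil => intro k c y hk; simp at hk
  | cons v t ih =>
    intro k c y hk
    cases k with
    | zero => simp [clist, rmin]
    | succ k =>
      simp only [clist, List.getD_cons_succ, List.getD_cons_succ, List.take_succ_cons,
        List.drop_succ_cons, rmin]
      exact ih k _ y (by simpa using hk)

theorem foldl_add_clist (m : List Int) : ∀ (c y s : Int),
    (clist m c y).foldl (· + ·) s = s + (rcnt m c : Int) + (scnt m y : Int) := by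
  induction m with
  | nil => intro c y s; simp [clist, rcnt, scnt]
  | cons v t ih =>
    intro c y s
    simp only [clist, List.foldl_cons, ih, rcnt, scnt]
    by_cases h1 : v < c <;> by_cases h2 : v < rmin t y <;>
      simp [h1, h2] <;> push_cast <;> ring

-- A's loop over the zipped middle values splits into two independent running-minimum counts
theorem foldA (ps : List (Int × Int)) : ∀ (ans l r : Int),
    ps.foldl (fun (s : Int × Int × Int) p =>
      let s := if s.2.1 > p.1 then (s.1 + 1, p.1, s.2.2) else s
      if p.2 < s.2.2 then (s.1 + 1, s.2.1, p.2) else s) (ans, l, r)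
    = (ans + (rcnt (ps.map Prod.fst) l : Int) + (rcnt (ps.map Prod.snd) r : Int),
       rmin (ps.map Prod.fst) l, rmin (ps.map Prod.snd) r) := by
  induction ps with
  | nil => intro ans l r; simp [rcnt, rmin]
  | cons p t ih =>
    intro ans l r
    simp only [List.foldl_cons, List.map_cons, rcnt, rmin]
    by_cases h1 : p.1 < l <;> by_cases h2 : p.2 < r <;>
      simp only [gt_iff_lt, h1, h2, if_pos, ite_false] <;>
      rw [ih] <;> push_cast <;> ring_nf

theorem pvLen (x y : Int) (m : List Int) : (x :: m ++ [y]).length = m.length + 2 := by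
  simp

theorem solution_concat (x y : Int) (m : List Int) :
    solution (x :: m ++ [y]) =
      (if rmin m x ≠ rmin m.reverse y
       then 2 + (rcnt m x : Int) + (rcnt m.reverse y : Int)
       else 2 + (rcnt m x : Int) + (rcnt m.reverse y : Int) - 1) := by
  have hleft : PySem.List.pyGetD (x :: m ++ [y]) 0 0 = x := by
    simp [pysem]
  have hright : PySem.List.pyGetD (x :: m ++ [y]) (-1) 0 = y :=
    PySem.List.pyGetD_neg_one_append_singleton (x :: m) y 0
  have hbound : (((x :: m ++ [y]).length : Int) - 1) = ((((0,0) : Int × Int) :: m.zip m.reverse).length : Int) := by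
    simp [List.length_zip]
  have hpt : ∀ (s : Int × Int × Int) (i : Int),
      i ∈ PySem.List.pyRange 1 ((((0,0) : Int × Int) :: m.zip m.reverse).length : Int) 1 →
      solStep (x :: m ++ [y]) s i
      = (fun (s : Int × Int × Int) (p : Int × Int) =>
          let s := if s.2.1 > p.1 then (s.1 + 1, p.1, s.2.2) else s
          if p.2 < s.2.2 then (s.1 + 1, s.2.1, p.2) else s) s
        (PySem.List.pyGetD (((0,0) : Int × Int) :: m.zip m.reverse) i ((0:Int),(0:Int))) := by
    intro s i hi
    rw [PySem.List.mem_pyRange_one] at hi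
    simp only [List.length_cons, List.length_zip, List.length_reverse, Nat.min_self] at hi
    obtain ⟨k, rfl⟩ : ∃ k : Nat, i = ((k + 1 : Nat) : Int) := by
      refine ⟨(i - 1).toNat, by omega⟩
    have hk : k < m.length := by omega
    have e1 : PySem.List.pyGetD (x :: m ++ [y]) ((k + 1 : Nat) : Int) 0 = m.getD k 0 := by
      rw [PySem.List.pyGetD_natCast]
      simp [List.getElem?_append_left hk, List.getD, hk]
    have e2 : PySem.List.pyGetD (((0,0) : Int × Int) :: m.zip m.reverse) ((k + 1 : Nat) : Int) ((0:Int),(0:Int))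
        = (m.getD k 0, m.reverse.getD k 0) := by
      rw [PySem.List.pyGetD_natCast, List.getD_cons_succ]
      rw [List.getD_eq_getElem _ _ (by simp only [List.length_zip, List.length_reverse, Nat.min_self]; omega)]
      rw [List.getElem_zip]
      rw [List.getD_eq_getElem _ _ hk, List.getD_eq_getElem _ _ (by simp only [List.length_reverse]; omega)]
    have e3 : PySem.List.pyGetD (x :: m ++ [y]) (-1 - ((k + 1 : Nat) : Int)) 0 = m.reverse.getD k 0 := by
      have hneg : (-1 - ((k + 1 : Nat) : Int)) = -((k + 2 : Nat) : Int) := by push_cast; ring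
      rw [hneg, PySem.List.pyGetD_neg_natCast _ _ _ (by omega) (by rw [pvLen]; omega)]
      rw [List.getElem_append_left (by simp only [pvLen, List.length_cons]; omega)]
      rw [List.getD_eq_getElem _ _ (by simp only [List.length_reverse]; omega), List.getElem_reverse]
      have h1 : (x :: m)[(x :: m ++ [y]).length - (k + 2)]'(by simp only [pvLen, List.length_cons]; omega)
          = (x :: m)[(m.length - 1 - k) + 1]'(by simp only [List.length_cons]; omega) := by
        congr 1; rw [pvLen]; omega
      rw [h1, List.getElem_cons_succ]
    simp only [solStep, e1, e2, e3]
  simp only [solution, hleft, hright, hbound]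
  rw [PySem.List.foldl_congr_mem _ _ _ _ hpt]
  rw [PySem.List.foldl_pyRange_pyGetD' (((0,0) : Int × Int) :: m.zip m.reverse) ((0:Int),(0:Int))
      (fun (s : Int × Int × Int) (p : Int × Int) =>
          let s := if s.2.1 > p.1 then (s.1 + 1, p.1, s.2.2) else s
          if p.2 < s.2.2 then (s.1 + 1, s.2.1, p.2) else s)
      (((2:Int), x, y)) (by omega : (0:Int) ≤ 1)]
  simp only [Int.toNat_one, List.drop_succ_cons, List.drop_zero]
  rw [foldA]
  have hf : List.map Prod.fst (m.zip m.reverse) = m :=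
    List.map_fst_zip (by rw [List.length_reverse])
  have hs : List.map Prod.snd (m.zip m.reverse) = m.reverse :=
    List.map_snd_zip (by rw [List.length_reverse])
  rw [hf, hs]

theorem solution_alt_concat (x y : Int) (m : List Int) :
    solution_alt (x :: m ++ [y]) =
      (if rmin m x == rmin m.reverse y
       then 2 + (rcnt m x : Int) + (rcnt m.reverse y : Int) - 1
       else 2 + (rcnt m x : Int) + (rcnt m.reverse y : Int)) := by
  have hne : ((((x :: m ++ [y]).length : Int)) == 1) = false := by
    simp; omega
  have hbound : (((x :: m ++ [y]).length : Int) - 1) = ((((0:Int) :: clist m x y).length : Int)) := by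
    simp only [pvLen, List.length_cons, clist_length]
    push_cast
    ring
  have hpt : ∀ (total : Int) (i : Int),
      i ∈ PySem.List.pyRange 1 ((((0:Int) :: clist m x y).length : Int)) 1 →
      altStep (x :: m ++ [y]) total i
      = (fun (total : Int) (v : Int) => total + v) total
          (PySem.List.pyGetD ((0:Int) :: clist m x y) i 0) := by
    intro total i hi
    rw [PySem.List.mem_pyRange_one] at hi
    simp only [List.length_cons, clist_length] at hi
    obtain ⟨k, rfl⟩ : ∃ k : Nat, i = ((k + 1 : Nat) : Int) := by
      refine ⟨(i - 1).toNat, by omega⟩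
    have hk : k < m.length := by omega
    have e1 : PySem.List.pyGetD (x :: m ++ [y]) ((k + 1 : Nat) : Int) 0 = m.getD k 0 := by
      rw [PySem.List.pyGetD_natCast]
      simp [List.getElem?_append_left hk, List.getD, hk]
    have e2 : PySem.List.slice (x :: m ++ [y]) none (some ((k + 1 : Nat) : Int)) = x :: m.take k := by
      rw [PySem.List.slice_to _ (by omega)]
      simp only [Int.toNat_natCast]
      have ht : k + 1 ≤ (x :: m).length := by simp only [List.length_cons]; omega
      rw [List.take_append_of_le_length ht, List.take_succ_cons]
    have e3 : PySem.List.slice (x :: m ++ [y]) (some (((k + 1 : Nat) : Int) + 1)) none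
        = m.drop (k + 1) ++ [y] := by
      have h2 : (((k + 1 : Nat) : Int) + 1) = ((k + 2 : Nat) : Int) := by push_cast; ring
      rw [h2, PySem.List.slice_from _ (by omega)]
      simp only [Int.toNat_natCast]
      have hd : k + 2 ≤ (x :: m).length := by simp only [List.length_cons]; omega
      rw [List.drop_append_of_le_length hd,
        show (k + 2) = (k + 1) + 1 from rfl, List.drop_succ_cons]
    have e4 : PySem.List.pyGetD ((0:Int) :: clist m x y) ((k + 1 : Nat) : Int) 0
        = (clist m x y).getD k 0 := by
      rw [PySem.List.pyGetD_natCast, List.getD_cons_succ]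
    simp only [altStep, e1, e2, e3, e4, pymin_cons, pymin_append_y, clist_getD m k x y hk]
    by_cases h1 : m.getD k 0 < rmin (m.take k) x <;>
      by_cases h2 : m.getD k 0 < rmin (m.drop (k+1)) y <;>
      simp only [h1, h2, if_true, if_false] <;> ring
  have hc1 : PySem.List.slice (x :: m ++ [y]) none (some (-1)) = x :: m := by
    rw [PySem.List.slice_to_neg_one]
    rw [show (x :: m ++ [y]) = (x :: m) ++ [y] by simp, List.dropLast_concat]
  have hc2 : PySem.List.slice (x :: m ++ [y]) (some 1) none = m ++ [y] := by
    rw [PySem.List.slice_from_one]; rfl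
  simp only [solution_alt, hne, Bool.false_eq_true, if_false, hbound, hc1, hc2,
    pymin_cons, pymin_append_y]
  rw [PySem.List.foldl_congr_mem _ _ _ _ hpt]
  rw [PySem.List.foldl_pyRange_pyGetD' ((0:Int) :: clist m x y) 0
      (fun (total : Int) (v : Int) => total + v) (2:Int) (by omega : (0:Int) ≤ 1)]
  simp only [Int.toNat_one, List.drop_succ_cons, List.drop_zero]
  rw [foldl_add_clist m x y 2, scnt_eq_rcnt_reverse, rmin_reverse]

-- ===== VERDICT (by name: the statement is the Claim_ definition above) =====
theorem solution_spec : Claim_equal_solution := by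
  intro a _ hpre
  unfold Spec_solution
  match a with
  | [] => exact absurd rfl hpre
  | x :: t =>
    rcases List.eq_nil_or_concat t with rfl | ⟨m, y, rfl⟩
    · have hA : solution [x] = 1 := by
        simp [solution, PySem.List.pyRange_one_eq_nil, pysem]
      have hB : solution_alt [x] = 1 := by
        simp [solution_alt]
      rw [hA, hB]
    · rw [List.concat_eq_append, ← List.cons_append]
      rw [solution_concat, solution_alt_concat]
      rw [rmin_reverse]
      by_cases h : rmin m x = rmin m y
      · simp [h]
      · simp [h]
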